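-- pv_equiv track=rewrite | github.com/HeroPham272/DE | task1.py | leap
-- ===== SOURCE A (Python) =====
-- def leap(y):
--     for i in range(1,9):
--         y += 1
--         if y % 400 == 0:
--             break
--         elif y % 4 == 0 and y % 100 != 0:
--             break
--     return y
-- ===== SOURCE B (Python) =====
-- def leap(y):
--     c = (y // 4 + 1) * 4  # smallest multiple of 4 strictly greater than y
--     if c % 100 != 0 or c % 400 == 0:
--         return c
--     return c + 4
-- ===== Notes on version B (the rewrite author's own statement) =====
-- stated objective: simpler
-- what changed: Replaces the bounded increment-and-test loop with closed-form arithmetic: the smallest multiple of four above y, advanced one more step when that year is a non-leap century.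
import Mathlib
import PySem

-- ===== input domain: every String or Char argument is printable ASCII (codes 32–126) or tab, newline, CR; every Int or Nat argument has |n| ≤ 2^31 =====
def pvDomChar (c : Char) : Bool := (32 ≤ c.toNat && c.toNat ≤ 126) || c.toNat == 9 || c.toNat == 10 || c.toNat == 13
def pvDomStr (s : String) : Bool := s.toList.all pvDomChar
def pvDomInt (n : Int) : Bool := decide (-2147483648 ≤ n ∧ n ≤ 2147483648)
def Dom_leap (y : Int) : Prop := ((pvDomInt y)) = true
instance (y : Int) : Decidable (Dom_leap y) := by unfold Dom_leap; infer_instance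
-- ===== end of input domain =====

-- B replaces A's bounded increment loop with closed-form arithmetic; same return value, no speed claim.
-- ===== PORT A =====
-- literal port of A's range(1,9) loop with break, carried as structural recursion over the range list
def leapLoop : List Int → Int → Int
  | [], y => y
  | _ :: rest, y =>
    let y := y + 1
    if PySem.Int.mod y 400 = 0 then y
    else if PySem.Int.mod y 4 = 0 ∧ PySem.Int.mod y 100 ≠ 0 then y
    else leapLoop rest y

def leap (y : Int) : Int := leapLoop (PySem.List.pyRange 1 9 1) y

-- ===== PORT B =====
def leap_alt (y : Int) : Int :=
  let c := (PySem.Int.floordiv y 4 + 1) * 4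
  if PySem.Int.mod c 100 ≠ 0 ∨ PySem.Int.mod c 400 = 0 then c
  else c + 4

-- ===== PRECONDITION & SPEC =====
def Spec_leap (y : Int) (out : Int) : Prop := out = leap_alt y
instance (y : Int) (out : Int) : Decidable (Spec_leap y out) := by unfold Spec_leap; infer_instance

-- ===== CLAIM (what is proved, stated in full; the proofs are below) =====
def Claim_equal_leap : Prop := ∀ (y : Int), Dom_leap y → Spec_leap y (leap y)

-- ===== LEMMAS AND PROOFS =====

-- ===== VERDICT (by name: the statement is the Claim_ definition above) =====
-- the break condition of A's loop, on the already-incremented year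
def LCond (t : Int) : Prop :=
  PySem.Int.mod t 400 = 0 ∨ (PySem.Int.mod t 4 = 0 ∧ PySem.Int.mod t 100 ≠ 0)

theorem lcond_iff (t : Int) : LCond t ↔ (t % 400 = 0 ∨ (t % 4 = 0 ∧ t % 100 ≠ 0)) := by
  unfold LCond
  rw [PySem.Int.mod_eq_emod_of_pos (by norm_num : (0:Int) < 400),
      PySem.Int.mod_eq_emod_of_pos (by norm_num : (0:Int) < 4),
      PySem.Int.mod_eq_emod_of_pos (by norm_num : (0:Int) < 100)]

theorem leapLoop_cons (a : Int) (rest : List Int) (y : Int) :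
    leapLoop (a :: rest) y =
      (if PySem.Int.mod (y+1) 400 = 0 then y+1
       else if PySem.Int.mod (y+1) 4 = 0 ∧ PySem.Int.mod (y+1) 100 ≠ 0 then y+1
       else leapLoop rest (y+1)) := rfl

-- if the loop's break condition first holds at t (within the list's length), the loop returns t
theorem loop_reach (l : List Int) (y t : Int) (h1 : y < t) (h2 : t - y ≤ l.length)
    (hstop : LCond t) (hskip : ∀ z, y < z → z < t → ¬ LCond z) :
    leapLoop l y = t := by
  induction l generalizing y with
  | nil => simp at h2; omega
  | cons a rest ih =>
    rw [leapLoop_cons]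
    by_cases he : t = y + 1
    · subst he
      split_ifs with c1 c2
      · rfl
      · rfl
      · exact absurd hstop (by unfold LCond; tauto)
    · have hnc : ¬ LCond (y + 1) := hskip (y + 1) (by omega) (by omega)
      rw [if_neg (fun h => hnc (Or.inl h)), if_neg (fun h => hnc (Or.inr h))]
      refine ih (y + 1) (by omega) ?_ (fun z hz1 hz2 => hskip z (by omega) hz2)
      simp only [List.length_cons] at h2
      push_cast at h2 ⊢
      omega

theorem pyRange_1_9 : PySem.List.pyRange 1 9 1 = [1,2,3,4,5,6,7,8] := by decide

theorem leap_eq (y : Int) : leap y = leap_alt y := by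
  have hc : PySem.Int.floordiv y 4 = y / 4 :=
    PySem.Int.floordiv_eq_ediv_of_pos (by norm_num : (0:Int) < 4)
  unfold leap leap_alt
  dsimp only
  rw [pyRange_1_9, hc]
  set c : Int := (y / 4 + 1) * 4 with hcdef
  have hclt : y < c ∧ c ≤ y + 4 ∧ c % 4 = 0 := by constructor <;> omega
  rw [PySem.Int.mod_eq_emod_of_pos (by norm_num : (0:Int) < 100),
      PySem.Int.mod_eq_emod_of_pos (by norm_num : (0:Int) < 400)]
  by_cases hb : c % 100 ≠ 0 ∨ c % 400 = 0
  · rw [if_pos hb]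
    exact loop_reach _ y c (by omega) (by simp; omega)
      (by rw [lcond_iff]; omega)
      (fun z hz1 hz2 => by rw [lcond_iff]; omega)
  · rw [if_neg hb]
    push Not at hb
    exact loop_reach _ y (c + 4) (by omega) (by simp; omega)
      (by rw [lcond_iff]; omega)
      (fun z hz1 hz2 => by rw [lcond_iff]; omega)

theorem leap_spec : Claim_equal_leap := by
  intro y _
  unfold Spec_leap
  exact leap_eq y
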